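-- pv_equiv track=rewrite | github.com/rootsec1/RAG_from_scratch | store.py | chunkify_list
-- ===== SOURCE A (Python) =====
-- def chunkify_list(summary_list) -> list:
--     """
--     Chunkify the list of summaries.
--
--     Parameters:
--     - summary_list (list): The list of summaries.
--
--     Returns:
--     - list: The list of chunks.
--     """
--     chunk_list = []
--     for idx, current_item_summary in enumerate(summary_list):
--         # Get the previous and next summaries
--         if idx == 0:
--             previous_item = ""
--         else:
--             previous_item = summary_list[idx - 1]
--
--         if idx == len(summary_list) - 1:
--             next_item = ""
--         else:
--             next_item = summary_list[idx + 1]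
--
--         # Create the chunk
--         chunk = f"{previous_item}\n\n{current_item_summary}\n\n{next_item}"
--         chunk = chunk.strip()
--         chunk_list.append(chunk)
--
--     return chunk_list
-- ===== SOURCE B (Python) =====
-- def chunkify_list(summary_list) -> list:
--     """Streaming one-pass version: emit each chunk one step late, carrying
--     only (prev, cur) state; no indexing, no length, works on any iterable."""
--     out = []
--     prev, cur = "", None
--     for nxt in summary_list:
--         if cur is not None:
--             out.append(f"{prev}\n\n{cur}\n\n{nxt}".strip())
--             prev = cur
--         cur = nxt
--     if cur is not None:
--         out.append(f"{prev}\n\n{cur}\n\n".strip())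
--     return out
-- ===== Notes on version B (the rewrite author's own statement) =====
-- stated objective: alternative
-- what changed: B is a streaming one-pass with delayed emission: it carries only a (prev, cur) state, emits cur's chunk when the following element arrives and flushes the last chunk after the loop, so there is no indexing, no len(), no boundary branches on idx, and it works on arbitrary iterables.
import Mathlib
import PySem

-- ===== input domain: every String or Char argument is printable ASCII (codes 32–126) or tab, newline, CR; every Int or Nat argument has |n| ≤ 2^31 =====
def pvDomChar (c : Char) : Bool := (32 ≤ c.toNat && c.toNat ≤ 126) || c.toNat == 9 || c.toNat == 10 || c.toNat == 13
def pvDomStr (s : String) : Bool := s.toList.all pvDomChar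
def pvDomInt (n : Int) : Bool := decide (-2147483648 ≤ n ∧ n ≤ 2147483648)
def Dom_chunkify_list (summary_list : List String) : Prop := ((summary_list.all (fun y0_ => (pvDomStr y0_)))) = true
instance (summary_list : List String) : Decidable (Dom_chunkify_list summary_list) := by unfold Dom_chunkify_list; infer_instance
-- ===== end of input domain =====

-- B replaces A's indexed loop with its idx==0 / idx==len-1 branches by a streaming one-pass
-- with delayed emission, carrying only a (prev, cur) state; same O(n) cost (alternative decomposition).

-- ===== PORT A =====
-- literal port of A: enumerate loop, explicit idx==0 / idx==len-1 branches,
-- summary_list[idx-1] / summary_list[idx+1] always in range (ported as pyGetD, exact here)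
def chunkify_list (summary_list : List String) : List String :=
  (PySem.List.enumerate summary_list 0).foldl
    (fun chunk_list p =>
      let idx := p.1
      let current_item_summary := p.2
      let previous_item := if idx = 0 then "" else PySem.List.pyGetD summary_list (idx - 1) ""
      let next_item := if idx = (summary_list.length : Int) - 1 then "" else PySem.List.pyGetD summary_list (idx + 1) ""
      chunk_list ++ [PySem.Str.strip (previous_item ++ "\n\n" ++ current_item_summary ++ "\n\n" ++ next_item)])
    []

-- ===== PORT B =====
-- port of B's streaming loop: foldl over the list with state (out, prev, cur : Option String),
-- emitting cur's chunk when the next element arrives, then flushing the final chunk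
def chunkify_list_alt (summary_list : List String) : List String :=
  let s := summary_list.foldl
    (fun (st : List String × String × Option String) nxt =>
      match st with
      | (out, prev, some cur) =>
          (out ++ [PySem.Str.strip (prev ++ "\n\n" ++ cur ++ "\n\n" ++ nxt)], cur, some nxt)
      | (out, prev, none) => (out, prev, some nxt))
    ([], "", none)
  match s with
  | (out, prev, some cur) => out ++ [PySem.Str.strip (prev ++ "\n\n" ++ cur ++ "\n\n")]
  | (out, _, none) => out

-- ===== PRECONDITION & SPEC =====
def Spec_chunkify_list (summary_list : List String) (out : List String) : Prop := out = chunkify_list_alt summary_list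
instance (summary_list : List String) (out : List String) : Decidable (Spec_chunkify_list summary_list out) := by unfold Spec_chunkify_list; infer_instance

-- ===== CLAIM =====
def Claim_equal_chunkify_list : Prop := ∀ (summary_list : List String), Dom_chunkify_list summary_list → Spec_chunkify_list summary_list (chunkify_list summary_list)

-- ===== LEMMAS AND PROOFS =====

-- the common reference: the chunk at position k of l, seeing `prev` before position 0
def chunkF (l : List String) (prev : String) (k : Nat) : String :=
  PySem.Str.strip ((if k = 0 then prev else l.getD (k - 1) "") ++ "\n\n" ++ l.getD k "" ++ "\n\n" ++
    (if k = l.length - 1 then "" else l.getD (k + 1) ""))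

-- the recursive spine of B's streaming loop
def chunkG (prev cur : String) : List String → List String
  | [] => [PySem.Str.strip (prev ++ "\n\n" ++ cur ++ "\n\n")]
  | n :: rest => PySem.Str.strip (prev ++ "\n\n" ++ cur ++ "\n\n" ++ n) :: chunkG cur n rest

theorem altFold_eq_chunkG (xs : List String) (out : List String) (prev cur : String) :
    (match xs.foldl
      (fun (st : List String × String × Option String) nxt =>
        match st with
        | (o, p, some c) =>
            (o ++ [PySem.Str.strip (p ++ "\n\n" ++ c ++ "\n\n" ++ nxt)], c, some nxt)
        | (o, p, none) => (o, p, some nxt))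
      (out, prev, some cur) with
    | (o, p, some c) => o ++ [PySem.Str.strip (p ++ "\n\n" ++ c ++ "\n\n")]
    | (o, _, none) => o) = out ++ chunkG prev cur xs := by
  induction xs generalizing out prev cur with
  | nil => simp [chunkG]
  | cons n rest ih =>
    simp only [List.foldl_cons]
    rw [ih]
    simp [chunkG]

theorem chunkF_shift (cur n : String) (rest : List String) (prev : String) (k : Nat) :
    chunkF (cur :: n :: rest) prev (Nat.succ k) = chunkF (n :: rest) cur k := by
  unfold chunkF
  have h1 : (if Nat.succ k = 0 then prev else (cur :: n :: rest).getD (Nat.succ k - 1) "")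
      = (if k = 0 then cur else (n :: rest).getD (k - 1) "") := by
    rcases k with _ | k' <;> simp
  have h2 : (cur :: n :: rest).getD (Nat.succ k) "" = (n :: rest).getD k "" := by simp
  have h3 : (if Nat.succ k = (cur :: n :: rest).length - 1 then ""
        else (cur :: n :: rest).getD (Nat.succ k + 1) "")
      = (if k = (n :: rest).length - 1 then "" else (n :: rest).getD (k + 1) "") := by
    simp only [List.length_cons, Nat.add_sub_cancel]
    by_cases hc : k = rest.length + 1 - 1
    · rw [if_pos (by omega), if_pos (by omega)]
    · rw [if_neg (by omega), if_neg (by omega)]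
      simp
  rw [h1, h2, h3]

theorem chunkG_eq_map (xs : List String) (prev cur : String) :
    chunkG prev cur xs = (List.range (xs.length + 1)).map (chunkF (cur :: xs) prev) := by
  induction xs generalizing prev cur with
  | nil =>
    simp only [List.length_nil, Nat.zero_add, List.range_succ, List.range_zero,
      List.nil_append, List.map_cons, List.map_nil]
    unfold chunkG chunkF
    simp only [List.length_cons, List.length_nil, List.getD_cons_zero, if_true]
    rw [String.append_empty]
  | cons n rest ih =>
    rw [List.range_succ_eq_map, List.map_cons, List.map_map]
    rw [chunkG, ih]
    refine List.cons_eq_cons.mpr ⟨?_, ?_⟩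
    · unfold chunkF
      simp only [List.length_cons, Nat.add_sub_cancel, List.getD_cons_zero, if_true]
      rw [if_neg (by omega : ¬ (0 = rest.length + 1))]
      simp
    · simp only [List.length_cons]
      apply List.map_congr_left
      intro k hk
      simp only [Function.comp_apply]
      exact (chunkF_shift cur n rest prev k).symm

theorem chunkA_eq_map (l : List String) :
    chunkify_list l = (List.range l.length).map (chunkF l "") := by
  unfold chunkify_list
  rw [PySem.List.foldl_append_singleton_eq_map
      (fun p : Int × String =>
        PySem.Str.strip ((if p.1 = 0 then "" else PySem.List.pyGetD l (p.1 - 1) "") ++ "\n\n" ++ p.2 ++ "\n\n" ++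
          (if p.1 = (l.length : Int) - 1 then "" else PySem.List.pyGetD l (p.1 + 1) ""))),
      PySem.List.enumerate_eq_map_pyRange l "", List.nil_append, List.map_map]
  apply List.ext_getElem
  · simp [PySem.List.length_pyRange_one]
  intro k h1 h2
  have hk : k < l.length := by simpa using h2
  simp only [List.getElem_map, PySem.List.getElem_pyRange_one, List.getElem_range, Function.comp]
  simp only [zero_add]
  unfold chunkF
  congr 1
  have hcur : PySem.List.pyGetD l ((k : Nat) : Int) "" = l.getD k "" := by
    rw [PySem.List.pyGetD_natCast]
  have hprev : (if (k : Int) = 0 then "" else PySem.List.pyGetD l ((k : Int) - 1) "")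
      = (if k = 0 then "" else l.getD (k - 1) "") := by
    rcases Nat.eq_zero_or_pos k with rfl | hk0
    · simp
    · rw [if_neg (by omega : ¬ ((k : Int) = 0)), if_neg (by omega : ¬ (k = 0)),
        show (k : Int) - 1 = ((k - 1 : Nat) : Int) by omega, PySem.List.pyGetD_natCast]
  have hnext : (if (k : Int) = (l.length : Int) - 1 then "" else PySem.List.pyGetD l ((k : Int) + 1) "")
      = (if k = l.length - 1 then "" else l.getD (k + 1) "") := by
    by_cases hc : k = l.length - 1
    · rw [if_pos (by omega), if_pos hc]
    · rw [if_neg (by omega), if_neg hc,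
        show (k : Int) + 1 = ((k + 1 : Nat) : Int) by omega, PySem.List.pyGetD_natCast]
  rw [hprev, hcur, hnext]

theorem chunkify_eq (l : List String) : chunkify_list l = chunkify_list_alt l := by
  cases l with
  | nil => rfl
  | cons x xs =>
    rw [chunkA_eq_map]
    show _ = (match (x :: xs).foldl _ ([], "", none) with
      | (o, p, some c) => o ++ [PySem.Str.strip (p ++ "\n\n" ++ c ++ "\n\n")]
      | (o, _, none) => o)
    simp only [List.foldl_cons]
    rw [altFold_eq_chunkG xs [] "" x, List.nil_append, chunkG_eq_map]
    simp

-- ===== VERDICT =====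
theorem chunkify_list_spec : Claim_equal_chunkify_list := by
  intro l _
  unfold Spec_chunkify_list
  exact chunkify_eq l
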